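-- pv_equiv track=rewrite | github.com/BucknellFilmSearch/FilmMediaDatabase | src/webpageGenerator.py | removeBadCharacters
-- ===== SOURCE A (Python) =====
-- def removeBadCharacters(text):
--     """
--     Removes utf-8 escaped characters that were showing up in results on the webpage.
--     :param text: text to remove the newline symbol from, and other utf-8 bullshit
--     :return: text that has been cleaned of garbage utf-8 characters
--     """
--     for i in range(len(text)):
--         if len(text) > i and text[i] == "\\":
--             if len(text) > i+1 and (text[i+1] == "0" or text[i+1] == "3" or text[i+1] == "2"):
--                 if len(text) > i+2 and (text[i+2] == "1" or text[i+2] == "0" or text[i+2] == "6"):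
--                     if len(text) > i+3 and (text[i+3] == "2"or text[i+3] == "2" or text[i+3] == "6"):
--                         text = text[0:i] + " " + text[i+4:]
--     return str(text)
-- ===== SOURCE B (Python) =====
-- def removeBadCharacters(text):
--     out = []
--     i = 0
--     n = len(text)
--     while i < n:
--         if (text[i] == "\\" and i + 3 < n
--                 and text[i+1] in "032" and text[i+2] in "106" and text[i+3] in "26"):
--             out.append(" ")
--             i += 4
--         else:
--             out.append(text[i])
--             i += 1
--     return "".join(out)
-- ===== Notes on version B (the rewrite author's own statement) =====
-- stated objective: alternative
-- what changed: A repeatedly rebuilds the whole string by concatenating slices at every match inside an index loop over the original length; B makes a single left-to-right pass appending to an output buffer, emitting a space and skipping 4 characters on a match.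
import Mathlib
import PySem

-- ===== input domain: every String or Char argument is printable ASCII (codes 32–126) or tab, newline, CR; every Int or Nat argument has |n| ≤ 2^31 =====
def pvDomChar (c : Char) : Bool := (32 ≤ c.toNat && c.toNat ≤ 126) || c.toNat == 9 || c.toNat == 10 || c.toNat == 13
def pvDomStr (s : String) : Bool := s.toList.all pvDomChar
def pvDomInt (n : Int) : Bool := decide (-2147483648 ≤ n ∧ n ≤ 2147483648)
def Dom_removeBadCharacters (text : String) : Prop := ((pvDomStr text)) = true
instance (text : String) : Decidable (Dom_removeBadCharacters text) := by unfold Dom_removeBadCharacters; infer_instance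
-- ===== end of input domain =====

-- B replaces A's index loop that rebuilds the whole string at every match by a single
-- left-to-right pass into an output buffer: copy a char, or emit a space and skip 4 on a match.

-- ===== PORT A =====
-- one iteration of A's `for i in range(len(text))` body (text is the mutable state)
def rbcStep (t : List Char) (i : Int) : List Char :=
  if (t.length : Int) > i ∧ PySem.List.pyGet? t i = some '\\' then
    if (t.length : Int) > i + 1 ∧ (PySem.List.pyGet? t (i+1) = some '0' ∨ PySem.List.pyGet? t (i+1) = some '3' ∨ PySem.List.pyGet? t (i+1) = some '2') then
      if (t.length : Int) > i + 2 ∧ (PySem.List.pyGet? t (i+2) = some '1' ∨ PySem.List.pyGet? t (i+2) = some '0' ∨ PySem.List.pyGet? t (i+2) = some '6') then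
        if (t.length : Int) > i + 3 ∧ (PySem.List.pyGet? t (i+3) = some '2' ∨ PySem.List.pyGet? t (i+3) = some '2' ∨ PySem.List.pyGet? t (i+3) = some '6') then
          PySem.List.slice t (some 0) (some i) ++ [' '] ++ PySem.List.slice t (some (i+4)) none
        else t
      else t
    else t
  else t

def removeBadCharacters (text : String) : String :=
  String.mk ((PySem.List.pyRange 0 ((text.toList.length : Int)) 1).foldl rbcStep text.toList)

-- ===== PORT B =====
def rbcIsBad (c1 c2 c3 : Char) : Bool :=
  (c1 = '0' || c1 = '3' || c1 = '2') && (c2 = '1' || c2 = '0' || c2 = '6') && (c3 = '2' || c3 = '6')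

-- B's while loop over the input with an output buffer: one char at a time, 4 on a match
def rbcScan : List Char → List Char
  | '\\' :: c1 :: c2 :: c3 :: rest =>
    if rbcIsBad c1 c2 c3 then ' ' :: rbcScan rest
    else '\\' :: rbcScan (c1 :: c2 :: c3 :: rest)
  | c :: rest => c :: rbcScan rest
  | [] => []
termination_by s => s.length
decreasing_by all_goals simp <;> omega

def removeBadCharacters_alt (text : String) : String :=
  String.mk (rbcScan text.toList)

-- ===== PRECONDITION & SPEC =====
def Spec_removeBadCharacters (text : String) (out : String) : Prop := out = removeBadCharacters_alt text
instance (text : String) (out : String) : Decidable (Spec_removeBadCharacters text out) := by unfold Spec_removeBadCharacters; infer_instance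

-- ===== CLAIM (what is proved, stated in full; the proofs are below) =====
def Claim_equal_removeBadCharacters : Prop := ∀ (text : String), Dom_removeBadCharacters text → Spec_removeBadCharacters text (removeBadCharacters text)

-- ===== LEMMAS AND PROOFS =====

-- indices at or past the length leave the state unchanged
lemma rbc_noop (l : List Int) (t : List Char) (h : ∀ i ∈ l, (t.length : Int) ≤ i) :
    l.foldl rbcStep t = t := by
  induction l with
  | nil => rfl
  | cons a l ih =>
    have ha : (t.length : Int) ≤ a := h a (by simp)
    have : rbcStep t a = t := by
      unfold rbcStep
      rw [if_neg]
      rintro ⟨h1, _⟩; omega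
    rw [List.foldl_cons, this]
    exact ih (fun i hi => h i (by simp [hi]))

-- A's step at index |p| on p ++ s acts exactly like B's one-step decision on s
lemma rbc_get (p s : List Char) (j : Nat) :
    PySem.List.pyGet? (p ++ s) ((p.length : Int) + (j : Int)) = s[j]? := by
  have h : ((p.length : Int) + (j : Int)) = ((p.length + j : Nat) : Int) := by push_cast; ring
  rw [h, PySem.List.pyGet?_natCast, List.getElem?_append_right (by omega)]
  congr 1; omega

lemma rbc_step_match (p : List Char) (c1 c2 c3 : Char) (rest : List Char)
    (hb : rbcIsBad c1 c2 c3 = true) :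
    rbcStep (p ++ '\\' :: c1 :: c2 :: c3 :: rest) ((p.length : Int)) = p ++ ' ' :: rest := by
  have hb' := hb
  simp only [rbcIsBad, Bool.and_eq_true, Bool.or_eq_true, decide_eq_true_eq] at hb'
  have h0 : PySem.List.pyGet? (p ++ '\\' :: c1 :: c2 :: c3 :: rest) ((p.length : Int)) = some '\\' := by
    simpa using rbc_get p ('\\' :: c1 :: c2 :: c3 :: rest) 0
  have h1 : PySem.List.pyGet? (p ++ '\\' :: c1 :: c2 :: c3 :: rest) ((p.length : Int) + 1) = some c1 := by
    simpa using rbc_get p ('\\' :: c1 :: c2 :: c3 :: rest) 1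
  have h2 : PySem.List.pyGet? (p ++ '\\' :: c1 :: c2 :: c3 :: rest) ((p.length : Int) + 2) = some c2 := by
    simpa using rbc_get p ('\\' :: c1 :: c2 :: c3 :: rest) 2
  have h3 : PySem.List.pyGet? (p ++ '\\' :: c1 :: c2 :: c3 :: rest) ((p.length : Int) + 3) = some c3 := by
    simpa using rbc_get p ('\\' :: c1 :: c2 :: c3 :: rest) 3
  unfold rbcStep
  rw [if_pos ⟨by simp only [List.length_append, List.length_cons]; push_cast; omega, h0⟩,
      if_pos ⟨by simp only [List.length_append, List.length_cons]; push_cast; omega, by rw [h1]; simp only [Option.some.injEq]; tauto⟩,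
      if_pos ⟨by simp only [List.length_append, List.length_cons]; push_cast; omega, by rw [h2]; simp only [Option.some.injEq]; tauto⟩,
      if_pos ⟨by simp only [List.length_append, List.length_cons]; push_cast; omega, by rw [h3]; simp only [Option.some.injEq]; tauto⟩]
  rw [PySem.List.slice_zero_start, PySem.List.slice_to_natCast,
      show ((p.length : Int) + 4) = ((p.length + 4 : Nat) : Int) by push_cast; ring,
      PySem.List.slice_from_natCast]
  rw [List.take_left' rfl,
      show p ++ '\\' :: c1 :: c2 :: c3 :: rest = (p ++ ['\\', c1, c2, c3]) ++ rest by simp,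
      List.drop_left' (by simp)]
  simp

set_option maxHeartbeats 1000000 in
lemma rbc_step_nomatch (p s : List Char)
    (h : ∀ c1 c2 c3 rest, s = '\\' :: c1 :: c2 :: c3 :: rest → rbcIsBad c1 c2 c3 = false) :
    rbcStep (p ++ s) ((p.length : Int)) = p ++ s := by
  rcases s with _ | ⟨a, _ | ⟨b, _ | ⟨c, _ | ⟨d, r⟩⟩⟩⟩
  · unfold rbcStep; split_ifs with g1 <;> try rfl
    exfalso; have := g1.1; simp at this
  · unfold rbcStep; split_ifs with g1 g2 <;> try rfl
    exfalso; have := g2.1; push_cast [List.length_append, List.length_cons, List.length_nil] at this; omega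
  · unfold rbcStep; split_ifs with g1 g2 g3 <;> try rfl
    exfalso; have := g3.1; push_cast [List.length_append, List.length_cons, List.length_nil] at this; omega
  · unfold rbcStep; split_ifs with g1 g2 g3 g4 <;> try rfl
    exfalso; have := g4.1; push_cast [List.length_append, List.length_cons, List.length_nil] at this; omega
  · unfold rbcStep; split_ifs with g1 g2 g3 g4 <;> try rfl
    exfalso
    have e0 : a = '\\' := by
      have := g1.2
      rw [show (p.length : Int) = (p.length : Int) + ((0 : Nat) : Int) by simp, rbc_get] at this
      simpa using this
    have e1 : b = '0' ∨ b = '3' ∨ b = '2' := by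
      have := g2.2
      rw [show (p.length : Int) + 1 = (p.length : Int) + ((1 : Nat) : Int) by simp, rbc_get] at this
      simpa using this
    have e2 : c = '1' ∨ c = '0' ∨ c = '6' := by
      have := g3.2
      rw [show (p.length : Int) + 2 = (p.length : Int) + ((2 : Nat) : Int) by simp, rbc_get] at this
      simpa using this
    have e3 : d = '2' ∨ d = '2' ∨ d = '6' := by
      have := g4.2
      rw [show (p.length : Int) + 3 = (p.length : Int) + ((3 : Nat) : Int) by simp, rbc_get] at this
      simpa using this
    have hbad : rbcIsBad b c d = true := by
      simp only [rbcIsBad, Bool.and_eq_true, Bool.or_eq_true, decide_eq_true_eq]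
      refine ⟨⟨?_, ?_⟩, ?_⟩
      · rcases e1 with h' | h' | h' <;> simp [h']
      · rcases e2 with h' | h' | h' <;> simp [h']
      · rcases e3 with h' | h' | h' <;> simp [h']
    subst e0
    have hcontra := h b c d r rfl
    rw [hbad] at hcontra
    simp at hcontra

lemma rbc_loop_eq : ∀ (k : Nat) (p s : List Char), s.length ≤ k →
    (PySem.List.pyRange (p.length : Int) ((p.length : Int) + k) 1).foldl rbcStep (p ++ s)
      = p ++ rbcScan s := by
  intro k
  induction k with
  | zero =>
    intro p s hs
    have hnil : s = [] := List.eq_nil_of_length_eq_zero (Nat.le_zero.mp hs)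
    subst hnil
    rw [PySem.List.pyRange_one_eq_nil (by omega)]
    simp [rbcScan]
  | succ k ih =>
    intro p s hs
    rw [PySem.List.pyRange_one_cons (by omega), List.foldl_cons]
    by_cases hm : ∃ c1 c2 c3 rest, s = '\\' :: c1 :: c2 :: c3 :: rest ∧ rbcIsBad c1 c2 c3 = true
    · obtain ⟨c1, c2, c3, rest, hse, hb⟩ := hm
      subst hse
      rw [rbc_step_match p c1 c2 c3 rest hb]
      have h1 : p ++ ' ' :: rest = (p ++ [' ']) ++ rest := by simp
      have h2 : ((p.length : Int) + 1) = (((p ++ [' ']).length : Int)) := by simp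
      have h3 : ((p.length : Int) + (k + 1 : Nat)) = (((p ++ [' ']).length : Int) + (k : Nat)) := by
        simp; ring
      rw [h1, h2, h3, ih (p ++ [' ']) rest (by simp at hs ⊢; omega)]
      simp [rbcScan, hb]
    · push Not at hm
      have hnom : ∀ c1 c2 c3 rest, s = '\\' :: c1 :: c2 :: c3 :: rest → rbcIsBad c1 c2 c3 = false := by
        intro c1 c2 c3 rest hse
        exact Bool.eq_false_iff.mpr (hm c1 c2 c3 rest hse)
      rw [rbc_step_nomatch p s hnom]
      cases s with
      | nil =>
        rw [show (p : List Char) ++ [] = (p ++ []) from rfl]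
        rw [rbc_noop _ _ (fun i hi => ?_)]
        · simp [rbcScan]
        · have hb := (PySem.List.mem_pyRange_one).mp hi
          simp; omega
      | cons c s' =>
        have h1 : p ++ c :: s' = (p ++ [c]) ++ s' := by simp
        have h2 : ((p.length : Int) + 1) = (((p ++ [c]).length : Int)) := by simp
        have h3 : ((p.length : Int) + (k + 1 : Nat)) = (((p ++ [c]).length : Int) + (k : Nat)) := by
          simp; ring
        rw [h1, h2, h3, ih (p ++ [c]) s' (by simp at hs ⊢; omega)]
        have hscan : rbcScan (c :: s') = c :: rbcScan s' := by
          by_cases hc : c = '\\'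
          · subst hc
            match s' with
            | [] => simp [rbcScan]
            | [d1] => simp [rbcScan]
            | [d1, d2] => simp [rbcScan]
            | d1 :: d2 :: d3 :: r =>
              have := hnom d1 d2 d3 r rfl
              simp [rbcScan, this]
          · cases s' <;> simp [rbcScan, hc]
        rw [hscan]
        simp

-- ===== VERDICT (by name: the statement is the Claim_ definition above) =====
theorem removeBadCharacters_spec : Claim_equal_removeBadCharacters := by
  intro text _
  unfold Spec_removeBadCharacters removeBadCharacters removeBadCharacters_alt
  have h := rbc_loop_eq text.toList.length [] text.toList le_rfl
  simp only [List.length_nil, Nat.cast_zero, List.nil_append, zero_add] at h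
  rw [h]
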